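-- pv_equiv track=rewrite | github.com/MK-523/general-magic-shadow-benchmark | benchmark/evaluator.py | _normalize_entity_keys
-- ===== SOURCE A (Python) =====
-- ENTITY_ALIASES = {
--     "zip_code": ["zip", "zipcode", "postal_code", "garage_zip"],
--     "vehicle": ["vehicle_description", "car", "auto", "insured_vehicle"],
--     "drivers": ["driver_count", "named_drivers", "driver_total"],
--     "loss_type": ["claim_type", "incident_type", "damage_type"],
--     "injury_reported": ["injuries_reported", "injury", "any_injuries"],
--     "water_off": ["water_shutoff", "water_shut_off", "water_stopped"],
--     "mailing_address": ["address", "new_address", "updated_address"],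
--     "garaging_changed": ["garage_changed", "garaging_address_changed", "garaging_update"],
--     "issue": ["issue_type", "renewal_issue", "customer_issue"],
--     "retention_risk": ["churn_risk", "save_risk", "retention_status"],
-- }
--
-- def _normalize_entity_keys(fields: dict) -> dict:
--     normalized = dict(fields)
--     lower_map = {str(key).lower(): key for key in fields.keys()}
--     for canonical, aliases in ENTITY_ALIASES.items():
--         if canonical in normalized:
--             continue
--         for alias in aliases:
--             matched_key = lower_map.get(alias.lower())
--             if matched_key is not None:
--                 normalized[canonical] = fields[matched_key]
--                 break
--     return normalized
-- ===== SOURCE B (Python) =====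
-- ENTITY_ALIASES = {
--     "zip_code": ["zip", "zipcode", "postal_code", "garage_zip"],
--     "vehicle": ["vehicle_description", "car", "auto", "insured_vehicle"],
--     "drivers": ["driver_count", "named_drivers", "driver_total"],
--     "loss_type": ["claim_type", "incident_type", "damage_type"],
--     "injury_reported": ["injuries_reported", "injury", "any_injuries"],
--     "water_off": ["water_shutoff", "water_shut_off", "water_stopped"],
--     "mailing_address": ["address", "new_address", "updated_address"],
--     "garaging_changed": ["garage_changed", "garaging_address_changed", "garaging_update"],
--     "issue": ["issue_type", "renewal_issue", "customer_issue"],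
--     "retention_risk": ["churn_risk", "save_risk", "retention_status"],
-- }
--
-- def _normalize_entity_keys(fields: dict) -> dict:
--     normalized = dict(fields)
--     for canonical, aliases in ENTITY_ALIASES.items():
--         if canonical in normalized:
--             continue
--         best = None  # (alias_position, value) with the smallest alias position
--         for key, value in fields.items():
--             low = str(key).lower()
--             if low in aliases:
--                 pos = aliases.index(low)
--                 if best is None or pos < best[0]:
--                     best = (pos, value)
--         if best is not None:
--             normalized[canonical] = best[1]
--     return normalized
-- ===== Notes on version B (the rewrite author's own statement) =====
-- stated objective: alternative
-- what changed: B drops A's precomputed lower_map hash and its first-hit alias scan with break; instead, for each missing canonical it makes one scan over the fields keeping the (alias position, value) pair with the smallest alias position; Pre_ excludes dicts containing two distinct keys with the same lowercased form, where which key wins is an accident of A's lower_map last-overwrite.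
import Mathlib
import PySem

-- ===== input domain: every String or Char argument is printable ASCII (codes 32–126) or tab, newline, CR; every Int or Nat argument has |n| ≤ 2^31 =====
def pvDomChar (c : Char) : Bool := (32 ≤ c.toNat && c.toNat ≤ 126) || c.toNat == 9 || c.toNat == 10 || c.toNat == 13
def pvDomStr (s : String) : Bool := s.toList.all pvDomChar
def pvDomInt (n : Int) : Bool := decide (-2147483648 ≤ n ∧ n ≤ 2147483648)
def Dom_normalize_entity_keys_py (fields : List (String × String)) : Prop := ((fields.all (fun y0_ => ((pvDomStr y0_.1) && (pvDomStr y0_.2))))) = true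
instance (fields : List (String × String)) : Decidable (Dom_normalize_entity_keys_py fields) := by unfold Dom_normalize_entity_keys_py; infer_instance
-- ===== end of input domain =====

-- B replaces A's precomputed lower_map hash with, per missing canonical, one scan
-- over the fields keeping the (alias position, value) pair of smallest position:
-- an alternative decomposition, same return value on Pre_.

-- ===== PORT A =====
def pvAliasTable : List (String × List String) :=
  [("zip_code", ["zip", "zipcode", "postal_code", "garage_zip"]),
   ("vehicle", ["vehicle_description", "car", "auto", "insured_vehicle"]),
   ("drivers", ["driver_count", "named_drivers", "driver_total"]),
   ("loss_type", ["claim_type", "incident_type", "damage_type"]),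
   ("injury_reported", ["injuries_reported", "injury", "any_injuries"]),
   ("water_off", ["water_shutoff", "water_shut_off", "water_stopped"]),
   ("mailing_address", ["address", "new_address", "updated_address"]),
   ("garaging_changed", ["garage_changed", "garaging_address_changed", "garaging_update"]),
   ("issue", ["issue_type", "renewal_issue", "customer_issue"]),
   ("retention_risk", ["churn_risk", "save_risk", "retention_status"])]

-- A's inner 'for alias in aliases: matched_key = lower_map.get(alias.lower()); if …: break'
def pvFirstAlias (aliases : List String) (lowerMap : PySem.Dict String String) : Option String :=
  match aliases with
  | [] => none
  | a :: rest =>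
    match lowerMap.get? (PySem.Str.lower a) with
    | some k => some k
    | none => pvFirstAlias rest lowerMap

def normalize_entity_keys_py (fields : List (String × String)) : List (String × String) :=
  -- the dict the Python function receives (insertion order, last value wins)
  let d : PySem.Dict String String := fields.foldl (fun m kv => m.insert kv.1 kv.2) PySem.Dict.empty
  let lowerMap : PySem.Dict String String :=
    d.keys.foldl (fun m k => m.insert (PySem.Str.lower k) k) PySem.Dict.empty
  let normalized : PySem.Dict String String :=
    pvAliasTable.foldl (fun nm row =>
      if nm.contains row.1 then nm
      else
        match pvFirstAlias row.2 lowerMap with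
        | some mk => nm.insert row.1 (d.getD mk "")
        | none => nm) d
  normalized.items

-- ===== PORT B =====
-- B's inner loop body: keep the (alias position, value) with the smallest position
def pvBestStep (aliases : List String) (best : Option (Nat × String)) (kv : String × String) :
    Option (Nat × String) :=
  let low := PySem.Str.lower kv.1
  match PySem.List.index? aliases low with
  | none => best
  | some pos =>
    match best with
    | none => some (pos, kv.2)
    | some b => if pos < b.1 then some (pos, kv.2) else best

def normalize_entity_keys_py_alt (fields : List (String × String)) : List (String × String) :=
  let d : PySem.Dict String String := fields.foldl (fun m kv => m.insert kv.1 kv.2) PySem.Dict.empty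
  let normalized : PySem.Dict String String :=
    pvAliasTable.foldl (fun nm row =>
      if nm.contains row.1 then nm
      else
        match d.items.foldl (pvBestStep row.2) none with
        | some b => nm.insert row.1 b.2
        | none => nm) d
  normalized.items

-- ===== PRECONDITION & SPEC =====
-- Pre_ excludes dicts containing two DISTINCT keys with the same lowercased form
-- (e.g. "Zip" and "ZIP"): there which key supplies the canonical value is an
-- accident of A's lower_map last-overwrite, a corner where either choice is defensible.
def Pre_normalize_entity_keys_py (fields : List (String × String)) : Prop :=
  List.Pairwise (fun p q : String × String =>
    p.1 = q.1 ∨ PySem.Str.lower p.1 ≠ PySem.Str.lower q.1) fields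
instance (fields : List (String × String)) : Decidable (Pre_normalize_entity_keys_py fields) := by unfold Pre_normalize_entity_keys_py; infer_instance

def pvWitness_normalize_entity_keys_py : (List (String × String)) := [("zip", "12345"), ("Car", "sedan")]

def Spec_normalize_entity_keys_py (fields : List (String × String)) (out : List (String × String)) : Prop := out = normalize_entity_keys_py_alt fields
instance (fields : List (String × String)) (out : List (String × String)) : Decidable (Spec_normalize_entity_keys_py fields out) := by unfold Spec_normalize_entity_keys_py; infer_instance

-- ===== CLAIM (what is proved, stated in full; the proofs are below) =====
def Claim_equal_normalize_entity_keys_py : Prop := ∀ (fields : List (String × String)), Dom_normalize_entity_keys_py fields → Pre_normalize_entity_keys_py fields → Spec_normalize_entity_keys_py fields (normalize_entity_keys_py fields)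

-- ===== LEMMAS AND PROOFS =====

-- lower_map as a fold over the items list
def pvLMap (its : List (String × String)) : PySem.Dict String String :=
  its.foldl (fun m kv => m.insert (PySem.Str.lower kv.1) kv.1) PySem.Dict.empty

-- A's alias scan, enriched with the position of the matching alias
def pvFirstPair (aliases : List String) (m : PySem.Dict String String) : Option (Nat × String) :=
  match aliases with
  | [] => none
  | a :: rest =>
    match m.get? (PySem.Str.lower a) with
    | some k => some (0, k)
    | none => (pvFirstPair rest m).map (fun b => (b.1 + 1, b.2))

lemma pvFirstAlias_eq_map (aliases : List String) (m : PySem.Dict String String) :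
    pvFirstAlias aliases m = (pvFirstPair aliases m).map Prod.snd := by
  induction aliases with
  | nil => rfl
  | cons a rest ih =>
    simp only [pvFirstAlias, pvFirstPair]
    cases m.get? (PySem.Str.lower a) with
    | some k => rfl
    | none => simp [ih, Option.map_map]; rfl

lemma pvFirstPair_empty (aliases : List String) :
    pvFirstPair aliases PySem.Dict.empty = none := by
  induction aliases with
  | nil => rfl
  | cons a rest ih => simp [pvFirstPair, PySem.Dict.get?_empty, ih]

lemma pvFirstPair_insert (aliases : List String)
    (hP : ∀ a ∈ aliases, PySem.Str.lower a = a)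
    (m : PySem.Dict String String) (l k : String) :
    pvFirstPair aliases (m.insert l k) =
      match PySem.List.index? aliases l with
      | none => pvFirstPair aliases m
      | some pos =>
        match pvFirstPair aliases m with
        | none => some (pos, k)
        | some b => if pos ≤ b.1 then some (pos, k) else pvFirstPair aliases m := by
  induction aliases with
  | nil => rfl
  | cons a rest ih =>
    have ha : PySem.Str.lower a = a := hP a (by simp)
    have hrest : ∀ x ∈ rest, PySem.Str.lower x = x := fun x hx => hP x (by simp [hx])
    by_cases hal : a = l
    · subst hal
      simp only [pvFirstPair, ha, PySem.Dict.get?_insert, PySem.List.index?_cons_self]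
      cases h0 : m.get? a with
      | some k0 => simp
      | none =>
        cases h1 : (pvFirstPair rest m).map (fun b => (b.1 + 1, b.2)) with
        | none => simp
        | some b =>
          have : 0 ≤ b.1 := Nat.zero_le _
          simp [this]
    · rw [show PySem.List.index? (a :: rest) l
            = Option.map (fun x => x + 1) (PySem.List.index? rest l) from
          PySem.List.index?_cons_of_ne rest hal]
      simp only [pvFirstPair, ha, PySem.Dict.get?_insert, if_neg hal]
      cases h0 : m.get? a with
      | some k0 =>
        cases h1 : PySem.List.index? rest l with
        | none => simp
        | some p => simp
      | none =>
        rw [ih hrest]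
        cases h1 : PySem.List.index? rest l with
        | none => simp
        | some p =>
          cases h2 : pvFirstPair rest m with
          | none => simp
          | some b =>
            by_cases hle : p ≤ b.1
            · simp [hle, Nat.succ_le_succ hle]
            · have hle' : ¬ (p + 1 ≤ b.1 + 1) := by omega
              simp [hle, hle']

-- the joint invariant: A's enriched alias scan over the lower map and B's min-scan
-- fold return the same position, key k, value v with (k, v) an item of the list
lemma pvMain (aliases : List String)
    (hP : ∀ a ∈ aliases, PySem.Str.lower a = a)
    (its : List (String × String))
    (hinj : its.Pairwise (fun p q => PySem.Str.lower p.1 ≠ PySem.Str.lower q.1)) :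
    ∃ r : Option (Nat × String × String),
      pvFirstPair aliases (pvLMap its) = r.map (fun x => (x.1, x.2.1)) ∧
      its.foldl (pvBestStep aliases) none = r.map (fun x => (x.1, x.2.2)) ∧
      ∀ x ∈ r, (x.2.1, x.2.2) ∈ its ∧
        PySem.List.index? aliases (PySem.Str.lower x.2.1) = some x.1 := by
  induction its using List.reverseRecOn with
  | nil =>
    refine ⟨none, ?_, rfl, by simp⟩
    simpa [pvLMap] using pvFirstPair_empty aliases
  | append_singleton its kv ih =>
    have hinj' : its.Pairwise (fun p q => PySem.Str.lower p.1 ≠ PySem.Str.lower q.1) :=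
      (List.pairwise_append.mp hinj).1
    have hdisj : ∀ p ∈ its, PySem.Str.lower p.1 ≠ PySem.Str.lower kv.1 := by
      intro p hp
      exact (List.pairwise_append.mp hinj).2.2 p hp kv (by simp)
    obtain ⟨r, hA, hB, hInv⟩ := ih hinj'
    have hmap : pvLMap (its ++ [kv]) = (pvLMap its).insert (PySem.Str.lower kv.1) kv.1 := by
      simp [pvLMap, List.foldl_append]
    rw [hmap, pvFirstPair_insert aliases hP]
    rw [List.foldl_append, hB]
    simp only [List.foldl_cons, List.foldl_nil, pvBestStep]
    cases hidx : PySem.List.index? aliases (PySem.Str.lower kv.1) with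
    | none =>
      refine ⟨r, by simp [hA], by simp, ?_⟩
      intro x hx
      exact ⟨List.mem_append_left _ (hInv x hx).1, (hInv x hx).2⟩
    | some pos =>
      cases hr : r with
      | none =>
        refine ⟨some (pos, kv.1, kv.2), ?_, ?_, ?_⟩
        · simp [hA, hr]
        · simp
        · intro x hx
          simp only [Option.mem_def, Option.some.injEq] at hx
          subst hx
          exact ⟨by simp, by simpa using hidx⟩
      | some b =>
        have hbInv := hInv b (by simp [hr])
        by_cases hlt : pos < b.1
        · refine ⟨some (pos, kv.1, kv.2), ?_, ?_, ?_⟩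
          · simp [hA, hr, Nat.le_of_lt hlt]
          · simp [hlt]
          · intro x hx
            simp only [Option.mem_def, Option.some.injEq] at hx
            subst hx
            exact ⟨by simp, by simpa using hidx⟩
        · have hne : pos ≠ b.1 := by
            intro heq
            -- equal positions force equal lowercased keys, contradicting hdisj
            obtain ⟨hk1, hget1, _⟩ := PySem.List.getElem_of_index?_eq_some hidx
            obtain ⟨hk2, hget2, _⟩ := PySem.List.getElem_of_index?_eq_some hbInv.2
            have : PySem.Str.lower b.2.1 = PySem.Str.lower kv.1 := by
              rw [← hget1, ← hget2]; simp [heq]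
            exact hdisj (b.2.1, b.2.2) hbInv.1 this
          have hgt : ¬ pos ≤ b.1 := by omega
          refine ⟨some b, ?_, ?_, ?_⟩
          · simp [hA, hr, hgt]
          · simp [hlt]
          · intro x hx
            simp only [Option.mem_def, Option.some.injEq] at hx
            subst hx
            exact ⟨List.mem_append_left _ hbInv.1, hbInv.2⟩

lemma pvAliasTable_lower :
    ∀ row ∈ pvAliasTable, ∀ a ∈ row.2, PySem.Str.lower a = a := by decide

-- ===== VERDICT (by name: the statement is the Claim_ definition above) =====
theorem normalize_entity_keys_py_spec : Claim_equal_normalize_entity_keys_py := by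
  intro fields _ hpre
  unfold Spec_normalize_entity_keys_py normalize_entity_keys_py normalize_entity_keys_py_alt
  set d : PySem.Dict String String :=
    fields.foldl (fun m kv => m.insert kv.1 kv.2) PySem.Dict.empty with hd
  have hnodup : d.keys.Nodup := by
    rw [hd]
    exact PySem.Dict.nodup_keys_foldl_insert_key fields Prod.fst (fun m kv => kv.2)
      PySem.Dict.empty PySem.Dict.nodup_keys_empty
  have hkeys_sub : ∀ k ∈ d.keys, k ∈ fields.map Prod.fst := by
    intro k hk
    rw [hd, PySem.Dict.keys_foldl_insert_key] at hk
    have h3 : PySem.Set.update (PySem.Dict.empty (κ := String) (ν := String)).keys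
        (fields.map Prod.fst) = PySem.Set.ofList (fields.map Prod.fst) := by
      simp [PySem.Set.update, PySem.Set.ofList_eq_foldl, PySem.Dict.keys_empty]
    rw [h3] at hk
    exact (PySem.Set.mem_ofList _ _).mp hk
  -- Pre_ transported to the dict's items: distinct lowercased keys
  have hKI : ∀ k1 ∈ fields.map Prod.fst, ∀ k2 ∈ fields.map Prod.fst,
      k1 ≠ k2 → PySem.Str.lower k1 ≠ PySem.Str.lower k2 := by
    have hsym : Symmetric (fun a b : String => a = b ∨ PySem.Str.lower a ≠ PySem.Str.lower b) := by
      intro a b h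
      rcases h with h | h
      · exact Or.inl h.symm
      · exact Or.inr fun e => h e.symm
    have hpw : (fields.map Prod.fst).Pairwise
        (fun a b : String => a = b ∨ PySem.Str.lower a ≠ PySem.Str.lower b) :=
      List.pairwise_map.mpr hpre
    intro k1 h1 k2 h2 hne
    rcases List.Pairwise.forall hsym hpw h1 h2 hne with h | h
    · exact absurd h hne
    · exact h
  have hinj : d.items.Pairwise (fun p q => PySem.Str.lower p.1 ≠ PySem.Str.lower q.1) := by
    have hpw : d.items.Pairwise (fun p q : String × String => p.1 ≠ q.1) :=
      List.pairwise_map.mp hnodup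
    refine hpw.imp_of_mem ?_
    intro p q hp hq hne
    exact hKI p.1 (hkeys_sub p.1 (PySem.Dict.mem_keys_of_mem_items _ hp))
      q.1 (hkeys_sub q.1 (PySem.Dict.mem_keys_of_mem_items _ hq)) hne
  have hlm : d.keys.foldl (fun m k => m.insert (PySem.Str.lower k) k) PySem.Dict.empty
      = pvLMap d.items := by
    have : d.keys = d.items.map Prod.fst := rfl
    rw [this, List.foldl_map, pvLMap]
  refine congrArg PySem.Dict.items ?_
  apply PySem.List.foldl_congr_mem
  intro nm row hrow
  by_cases hc : nm.contains row.1
  · simp [hc]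
  · obtain ⟨r, hA, hB, hInv⟩ := pvMain row.2 (pvAliasTable_lower row hrow) d.items hinj
    simp only [hc, if_neg, Bool.false_eq_true, not_false_iff]
    rw [pvFirstAlias_eq_map, hlm, hA, hB]
    cases hr : r with
    | none => simp
    | some x =>
      have hx := hInv x (by simp [hr])
      have hval : d.getD x.2.1 "" = x.2.2 :=
        PySem.Dict.getD_of_mem_items _ hx.1 hnodup ""
      simp [Option.map_some, hval]
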